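-- pv_equiv track=rewrite | github.com/harshavardhangadepalli/GeeksForGeeks | SDEList/wordBreaknew.py | find
-- ===== SOURCE A (Python) =====
-- def find(arr,k):
--     if sum(arr) < 2*k:
--         return 0
--     def find_partition(a):
--         if len(a) <= 0:
--             return list()
--         s = 0
--         ret = list()
--         for i in range(len(a)):
--             s += a[i]
--             if s == k:
--                 ret.append(i)
--             if s > k:
--                 break
--         return ret
--     dp = dict()
--     def solve(index):
--         if index in dp:
--             return dp[index]
--         if index == len(arr):
--             return 1
--         l = find_partition(arr[index:])
--         ans = 0
--         for item in l:
--             # sum will be equal to k till the location index + item.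
--             # we need to call find_partition on the place index+item+1, and then solve.
--             ans += solve(index+item+1)
--         dp[index] = ans
--         return dp[index]
--     return solve(0)
-- ===== SOURCE B (Python) =====
-- def find(arr, k):
--     if sum(arr) < 2 * k:
--         return 0
--     n = len(arr)
--     # dp[i] = number of ways to split arr[i:] into contiguous blocks each summing to k,
--     # built iteratively back-to-front (no recursion, no memo dict, no slicing).
--     dp = [0] * (n + 1)
--     dp[n] = 1
--     for i in range(n - 1, -1, -1):
--         s = 0
--         acc = 0
--         for j in range(i, n):
--             s += arr[j]
--             if s == k:
--                 acc += dp[j + 1]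
--             if s > k:
--                 break
--         dp[i] = acc
--     return dp[0]
-- ===== Notes on version B (the rewrite author's own statement) =====
-- stated objective: simpler
-- what changed: Replaced the memoized recursion with a nested find_partition helper, per-call list slicing and an index-list accumulator by a flat bottom-up DP table filled back-to-front with a direct inner scan (no recursion, no dict, no slices, no intermediate index lists).
import Mathlib
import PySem

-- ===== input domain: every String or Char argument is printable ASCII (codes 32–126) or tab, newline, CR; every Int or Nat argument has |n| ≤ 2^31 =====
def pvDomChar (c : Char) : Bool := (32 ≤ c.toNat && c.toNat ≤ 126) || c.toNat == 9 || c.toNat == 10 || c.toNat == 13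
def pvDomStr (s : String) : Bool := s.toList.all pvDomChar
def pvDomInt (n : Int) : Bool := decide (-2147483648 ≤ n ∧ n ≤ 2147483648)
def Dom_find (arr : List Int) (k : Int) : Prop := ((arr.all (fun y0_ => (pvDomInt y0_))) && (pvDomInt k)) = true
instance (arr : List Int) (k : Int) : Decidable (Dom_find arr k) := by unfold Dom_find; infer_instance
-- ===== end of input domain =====

-- B replaces A's memoized recursion (nested find_partition helper, per-call slicing,
-- intermediate index lists, memo dict) by a flat bottom-up DP table filled back-to-front.

-- ===== PORT A =====
-- the `for i in range(len(a))` loop of find_partition: walks a with running sum s and index i,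
-- appending i when s == k and breaking when s > k
def fpLoop (k : Int) : List Int → Int → Int → List Int
  | [], _, _ => []
  | x :: rest, s, i =>
    let s' := s + x
    let here := if s' == k then [i] else []
    if s' > k then here else here ++ fpLoop k rest s' (i + 1)

def findPartition (a : List Int) (k : Int) : List Int :=
  if a.length ≤ 0 then [] else fpLoop k a 0 0

-- solve(index) with the memo dict threaded through; fuel is a totality guard only
-- (fuel = arr.length + 1 always suffices: index strictly increases towards len(arr))
def solveA (arr : List Int) (k : Int) : Nat → Int → PySem.Dict Int Int → Int × PySem.Dict Int Int
  | 0, _, dp => (0, dp)   -- fuel exhausted: unreachable at the call below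
  | fuel + 1, index, dp =>
    match dp.get? index with
    | some v => (v, dp)
    | none =>
      if index == (arr.length : Int) then (1, dp)
      else
        -- arr[index:] ; index is always ≥ 0 here (starts at 0, items are ≥ 0)
        let l := findPartition (PySem.List.slice arr (some index) none) k
        let st := l.foldl (fun (st : Int × PySem.Dict Int Int) item =>
            (st.1 + (solveA arr k fuel (index + item + 1) st.2).1,
             (solveA arr k fuel (index + item + 1) st.2).2)) (0, dp)
        let dp' := st.2.insert index st.1
        (dp'.getD index 0, dp')   -- `return dp[index]`

def find (arr : List Int) (k : Int) : Int :=
  if arr.sum < 2 * k then 0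
  else (solveA arr k (arr.length + 1) 0 PySem.Dict.empty).1

-- ===== PORT B =====
-- the inner `for j in range(i, n)` scan: walks the suffix arr[i:] together with the
-- already-computed table entries dp[i+1:], accumulating s and acc, breaking when s > k
def rowB (k : Int) : List Int → List Int → Int → Int → Int
  | [], _, _, acc => acc
  | a :: rest, t, s, acc =>
    match t with
    | [] => acc   -- unreachable: the table always covers the suffix
    | d :: drest =>
      let s' := s + a
      let acc' := if s' == k then acc + d else acc
      if s' > k then acc' else rowB k rest drest s' acc'

-- dp built back-to-front: tablesB arr k = [dp[0], dp[1], …, dp[n]] with dp[n] = 1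
def tablesB (arr : List Int) (k : Int) : List Int :=
  match arr with
  | [] => [1]
  | a :: rest =>
    let t := tablesB rest k
    rowB k (a :: rest) t 0 0 :: t

def find_alt (arr : List Int) (k : Int) : Int :=
  if arr.sum < 2 * k then 0
  else (tablesB arr k).headD 0

-- ===== PRECONDITION & SPEC =====
def Spec_find (arr : List Int) (k : Int) (out : Int) : Prop := out = find_alt arr k
instance (arr : List Int) (k : Int) (out : Int) : Decidable (Spec_find arr k out) := by unfold Spec_find; infer_instance

-- ===== CLAIM (what is proved, stated in full; the proofs are below) =====
def Claim_equal_find : Prop := ∀ (arr : List Int) (k : Int), Dom_find arr k → Spec_find arr k (find arr k)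

-- ===== LEMMAS AND PROOFS =====

-- dp[i] as a function of the suffix
def Wfun (arr : List Int) (k : Int) (i : Int) : Int := (tablesB (arr.drop i.toNat) k).headD 0

-- the memo dict only ever holds correct values
def GoodD (arr : List Int) (k : Int) (dp : PySem.Dict Int Int) : Prop :=
  ∀ i v, dp.get? i = some v → v = Wfun arr k i

theorem fpLoop_mem_bounds (k : Int) (a : List Int) :
    ∀ (s i item : Int), item ∈ fpLoop k a s i → i ≤ item ∧ item < i + a.length := by
  induction a with
  | nil => intro s i item h; simp [fpLoop] at h
  | cons x rest ih =>
    intro s i item h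
    simp only [fpLoop] at h
    by_cases hk : s + x = k
    · have hb : (s + x == k) = true := by simpa using hk
      have hgt : ¬ (s + x > k) := by omega
      simp only [hb, if_true, if_neg hgt, List.cons_append, List.nil_append] at h
      rcases List.mem_cons.1 h with h | h
      · subst h
        refine ⟨le_rfl, ?_⟩
        simp only [List.length_cons]
        push_cast
        omega
      · have := ih (s + x) (i + 1) item h
        simp only [List.length_cons]
        push_cast at this ⊢
        omega
    · have hb : (s + x == k) = false := by simpa using hk
      simp only [hb, Bool.false_eq_true, if_false] at h
      split at h
      · simp at h
      · simp only [List.nil_append] at h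
        have := ih (s + x) (i + 1) item h
        simp only [List.length_cons]
        push_cast at this ⊢
        omega

theorem tablesB_get (k : Int) :
    ∀ (b : List Int) (p : Nat), p ≤ b.length →
      (tablesB b k)[p]? = some ((tablesB (b.drop p) k).headD 0) := by
  intro b
  induction b with
  | nil =>
    intro p hp
    have hp0 : p = 0 := Nat.le_zero.mp hp
    subst hp0
    simp [tablesB]
  | cons a rest ih =>
    intro p hp
    cases p with
    | zero => simp [tablesB]
    | succ q =>
      simp only [tablesB, List.getElem?_cons_succ, List.drop_succ_cons]
      exact ih q (by simpa using hp)

-- the fold over the indices find_partition returns, summing g, equals B's inner scan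
theorem fp_fold_eq_rowB (k : Int) (g : Int → Int) :
    ∀ (a t : List Int) (s : Int) (i : Int) (acc : Int),
      (∀ p : Nat, p < a.length → t[p]? = some (g (i + p))) →
      (fpLoop k a s i).foldl (fun ans item => ans + g item) acc = rowB k a t s acc := by
  intro a
  induction a with
  | nil => intro t s i acc _; simp [fpLoop, rowB]
  | cons x rest ih =>
    intro t s i acc hT
    have h0 : t[0]? = some (g (i + (0 : Nat))) := hT 0 (by simp)
    match t, h0 with
    | d :: drest, h0 =>
      have hd : d = g i := by simpa using h0
      simp only [fpLoop, rowB]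
      by_cases hgt : s + x > k
      · have hne : (s + x == k) = false := by
          simp only [beq_eq_false_iff_ne]; omega
        simp [hgt, hne]
      · have hrest : ∀ p : Nat, p < rest.length → drest[p]? = some (g ((i + 1) + p)) := by
          intro p hp
          have := hT (p + 1) (by simp; omega)
          push_cast at this ⊢
          simpa [add_assoc, add_comm, add_left_comm] using this
        by_cases heq : s + x = k
        · have hb : (s + x == k) = true := by simpa using heq
          simp only [hb, if_true, if_neg hgt, List.foldl_append, List.foldl_cons, List.foldl_nil, hd]
          exact ih drest (s + x) (i + 1) (acc + g i) hrest
        · have hb : (s + x == k) = false := by simpa using heq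
          simp only [hb, Bool.false_eq_true, if_false, if_neg hgt, List.nil_append]
          exact ih drest (s + x) (i + 1) acc hrest

theorem Wfun_len (arr : List Int) (k : Int) : Wfun arr k (arr.length : Int) = 1 := by
  simp [Wfun, tablesB]

theorem solveA_correct (arr : List Int) (k : Int) :
    ∀ (fuel : Nat) (index : Int) (dp : PySem.Dict Int Int),
      0 ≤ index → index ≤ (arr.length : Int) → (arr.length : Int) - index < (fuel : Int) →
      GoodD arr k dp →
      (solveA arr k fuel index dp).1 = Wfun arr k index ∧ GoodD arr k (solveA arr k fuel index dp).2 := by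
  intro fuel
  induction fuel with
  | zero => intro index dp h0 hle hf _; exfalso; simp at hf; omega
  | succ fuel ih =>
    intro index dp h0 hle hf hG
    cases hmem : dp.get? index with
    | some v =>
      simp only [solveA, hmem]
      exact ⟨hG index v hmem, hG⟩
    | none =>
      by_cases hEq : index = (arr.length : Int)
      · have hb : (index == (arr.length : Int)) = true := by simpa using hEq
        simp only [solveA, hmem, hb, if_true]
        subst hEq
        exact ⟨(Wfun_len arr k).symm, hG⟩
      · have hb : (index == (arr.length : Int)) = false := by simpa using hEq
        have hlt : index < (arr.length : Int) := lt_of_le_of_ne hle hEq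
        simp only [solveA, hmem, hb, Bool.false_eq_true, if_false]
        rw [PySem.List.slice_from arr h0]
        have hmn : index.toNat < arr.length := by omega
        have haLen : (arr.drop index.toNat).length = arr.length - index.toNat := by simp
        have haPos : 0 < (arr.drop index.toNat).length := by omega
        have hfp : findPartition (arr.drop index.toNat) k = fpLoop k (arr.drop index.toNat) 0 0 := by
          unfold findPartition; rw [if_neg (by omega)]
        -- the fold over l, threading the dict
        have fold_lemma : ∀ (l : List Int) (acc : Int) (d : PySem.Dict Int Int),
            (∀ item ∈ l, 0 ≤ item ∧ item < ((arr.drop index.toNat).length : Int)) → GoodD arr k d →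
            (l.foldl (fun (st : Int × PySem.Dict Int Int) item =>
                (st.1 + (solveA arr k fuel (index + item + 1) st.2).1,
                 (solveA arr k fuel (index + item + 1) st.2).2)) (acc, d)).1
              = l.foldl (fun ans item => ans + Wfun arr k (index + item + 1)) acc ∧
            GoodD arr k (l.foldl (fun (st : Int × PySem.Dict Int Int) item =>
                (st.1 + (solveA arr k fuel (index + item + 1) st.2).1,
                 (solveA arr k fuel (index + item + 1) st.2).2)) (acc, d)).2 := by
          intro l
          induction l with
          | nil => intro acc d _ hGd; exact ⟨rfl, hGd⟩
          | cons it rest ihl =>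
            intro acc d hbound hGd
            have hit := hbound it (by simp)
            have h1 : 0 ≤ index + it + 1 := by omega
            have h2 : index + it + 1 ≤ (arr.length : Int) := by
              have : ((arr.drop index.toNat).length : Int) = (arr.length : Int) - index := by
                rw [haLen]; omega
              omega
            have h3 : (arr.length : Int) - (index + it + 1) < (fuel : Int) := by
              have := hf; omega
            have hrec := ih (index + it + 1) d h1 h2 h3 hGd
            simp only [List.foldl_cons]
            rw [hrec.1]
            exact ihl (acc + Wfun arr k (index + it + 1))
              (solveA arr k fuel (index + it + 1) d).2
              (fun x hx => hbound x (by simp [hx])) hrec.2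
        have hbounds : ∀ item ∈ fpLoop k (arr.drop index.toNat) 0 0,
            0 ≤ item ∧ item < ((arr.drop index.toNat).length : Int) := by
          intro item hitem
          have := fpLoop_mem_bounds k (arr.drop index.toNat) 0 0 item hitem
          omega
        have hfold := fold_lemma (fpLoop k (arr.drop index.toNat) 0 0) 0 dp hbounds hG
        rw [hfp]
        -- the pure sum equals B's inner scan over the suffix and the table of its tail
        have hsum : (fpLoop k (arr.drop index.toNat) 0 0).foldl
              (fun ans item => ans + Wfun arr k (index + item + 1)) 0
            = rowB k (arr.drop index.toNat) (tablesB (arr.drop (index.toNat + 1)) k) 0 0 := by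
          apply fp_fold_eq_rowB k (fun item => Wfun arr k (index + item + 1)) (arr.drop index.toNat)
            (tablesB (arr.drop (index.toNat + 1)) k) 0 0 0
          intro p hp
          have hple : p ≤ (arr.drop (index.toNat + 1)).length := by
            simp only [List.length_drop]
            omega
          rw [tablesB_get k (arr.drop (index.toNat + 1)) p hple, List.drop_drop]
          have h1 : ((0 : Int) + (p : Nat) : Int) = (p : Int) := by ring
          have h2 : ((index : Int) + (p : Nat) + 1).toNat = p + (index.toNat + 1) := by omega
          simp only [Wfun, h1, h2]
          rw [show p + (index.toNat + 1) = index.toNat + 1 + p from by omega]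
        -- B's dp[index] unfolds to exactly that scan
        have hcons : arr.drop index.toNat = arr[index.toNat] :: arr.drop (index.toNat + 1) :=
          List.drop_eq_getElem_cons hmn
        have hW : Wfun arr k index
            = rowB k (arr.drop index.toNat) (tablesB (arr.drop (index.toNat + 1)) k) 0 0 := by
          unfold Wfun
          rw [hcons]
          simp only [tablesB, List.headD_cons]
        constructor
        · simp only [PySem.Dict.getD_eq_get?_getD, PySem.Dict.get?_insert_self, Option.getD_some]
          rw [hfold.1, hsum, hW]
        · intro i v hiv
          by_cases hik : i = index
          · subst hik
            rw [PySem.Dict.get?_insert_self] at hiv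
            cases hiv
            rw [hfold.1, hsum, hW]
          · rw [PySem.Dict.get?_insert, if_neg hik] at hiv
            exact hfold.2 i v hiv

-- ===== VERDICT (by name: the statement is the Claim_ definition above) =====
theorem find_spec : Claim_equal_find := by
  intro arr k _
  unfold Spec_find find find_alt
  by_cases h : arr.sum < 2 * k
  · simp [h]
  · simp only [h, if_false]
    have hG : GoodD arr k PySem.Dict.empty := by
      intro i v hiv; simp [PySem.Dict.get?_empty] at hiv
    have := (solveA_correct arr k (arr.length + 1) 0 PySem.Dict.empty le_rfl
      (by positivity) (by push_cast; omega) hG).1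
    rw [this]
    unfold Wfun
    simp
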